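-- pv_equiv track=rewrite | github.com/MoriyaBitton/Machine_Learning | Ex4/סמסטר קודם - עדן שקורי/hw4 2021b_sol/Utilities.py | check_tag
-- ===== SOURCE A (Python) =====
-- def check_tag(labels):
--     if len(labels) == 0:
--         return None
--
--     pos_count = 0
--     neg_count = 0
--
--     for i in labels:
--         if i == 1:
--             pos_count = pos_count + 1
--         else:
--             neg_count = neg_count + 1
--
--     if pos_count > neg_count:
--         return True
--     return False
-- ===== SOURCE B (Python) =====
-- def _margin(ls, lo, hi):
--     # signed majority margin of ls[lo:hi]: (+1 per label == 1, -1 per other label)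
--     if hi - lo == 1:
--         return 1 if ls[lo] == 1 else -1
--     mid = (lo + hi) // 2
--     return _margin(ls, lo, mid) + _margin(ls, mid, hi)
--
-- def check_tag(labels):
--     if len(labels) == 0:
--         return None
--     return _margin(labels, 0, len(labels)) > 0
-- ===== Notes on version B (the rewrite author's own statement) =====
-- stated objective: alternative
-- what changed: Replaces the two-counter linear loop and final comparison with a divide-and-conquer recursion over index ranges that computes a signed majority margin (+1 for label 1, -1 otherwise) and tests margin > 0.
import Mathlib
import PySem

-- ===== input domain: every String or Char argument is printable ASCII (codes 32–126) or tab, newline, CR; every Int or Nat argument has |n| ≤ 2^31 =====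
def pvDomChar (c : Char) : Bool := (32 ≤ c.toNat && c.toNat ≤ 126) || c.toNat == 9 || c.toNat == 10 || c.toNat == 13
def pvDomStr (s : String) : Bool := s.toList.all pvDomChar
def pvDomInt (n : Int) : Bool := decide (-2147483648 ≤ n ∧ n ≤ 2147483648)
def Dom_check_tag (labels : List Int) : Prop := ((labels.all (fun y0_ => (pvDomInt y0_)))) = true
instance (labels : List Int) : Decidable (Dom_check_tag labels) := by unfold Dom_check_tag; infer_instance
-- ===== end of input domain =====

-- B replaces A's two-counter loop with a divide-and-conquer recursion computing a signed
-- majority margin (+1 per label 1, -1 per other label) over index ranges; equal return values proved below.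

-- ===== PORT A =====
def check_tag (labels : List Int) : Option Bool :=
  if labels.length = 0 then none
  else
    let counts := labels.foldl
      (fun (pn : Int × Int) i => if i = 1 then (pn.1 + 1, pn.2) else (pn.1, pn.2 + 1))
      (0, 0)
    if counts.1 > counts.2 then some true else some false

-- ===== PORT B =====
-- port of Source B's _margin; the 'hi - lo ≤ 0' guard only makes the recursion total
-- (B never calls _margin on an empty range)
def pvMargin (ls : List Int) (lo hi : Int) : Int :=
  if _hle : hi - lo ≤ 0 then 0
  else if _h1 : hi - lo = 1 then
    match PySem.List.pyGet? ls lo with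
    | some v => if v = 1 then 1 else -1
    | none => 0
  else
    let mid := PySem.Int.floordiv (lo + hi) 2
    pvMargin ls lo mid + pvMargin ls mid hi
termination_by (hi - lo).toNat
decreasing_by
  · have := PySem.Int.floordiv_eq_ediv_of_pos (a := lo + hi) (b := 2) (by omega)
    simp only [this] at *; omega
  · have := PySem.Int.floordiv_eq_ediv_of_pos (a := lo + hi) (b := 2) (by omega)
    simp only [this] at *; omega

def check_tag_alt (labels : List Int) : Option Bool :=
  if labels.length = 0 then none
  else some (decide (pvMargin labels 0 (labels.length : Int) > 0))

-- ===== PRECONDITION & SPEC =====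
def Spec_check_tag (labels : List Int) (out : Option Bool) : Prop := out = check_tag_alt labels
instance (labels : List Int) (out : Option Bool) : Decidable (Spec_check_tag labels out) := by unfold Spec_check_tag; infer_instance

-- ===== CLAIM (what is proved, stated in full; the proofs are below) =====
def Claim_equal_check_tag : Prop := ∀ (labels : List Int), Dom_check_tag labels → Spec_check_tag labels (check_tag labels)

-- ===== LEMMAS AND PROOFS =====

lemma check_tag_fold (labels : List Int) (p n : Int) :
    labels.foldl
      (fun (pn : Int × Int) i => if i = 1 then (pn.1 + 1, pn.2) else (pn.1, pn.2 + 1))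
      (p, n)
    = (p + (labels.countP (fun x => decide (x = 1)) : Int),
       n + ((labels.length : Int) - (labels.countP (fun x => decide (x = 1)) : Int))) := by
  induction labels generalizing p n with
  | nil => simp
  | cons x xs ih =>
    simp only [List.foldl_cons]
    by_cases hx : x = 1 <;> simp [hx, ih] <;> omega

-- the margin of ls[lo:hi] is 2 * (number of 1s in the segment) - (its length)
lemma pvMargin_eq (ls : List Int) : ∀ (n : Nat) (lo hi : Int), (hi - lo).toNat = n →
    0 ≤ lo → lo < hi → hi ≤ (ls.length : Int) →
    pvMargin ls lo hi
      = 2 * (((ls.drop lo.toNat).take (hi - lo).toNat).countP (fun x => decide (x = 1)) : Int)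
        - (hi - lo) := by
  intro n
  induction n using Nat.strong_induction_on with
  | _ n ih =>
    intro lo hi hn h0 hlh hh
    rw [pvMargin]
    rw [dif_neg (by omega : ¬ hi - lo ≤ 0)]
    by_cases h1 : hi - lo = 1
    · rw [dif_pos h1]
      have hlt : lo.toNat < ls.length := by omega
      have hget : PySem.List.pyGet? ls lo = ls[lo.toNat]? :=
        PySem.List.pyGet?_of_nonneg ls h0
      have hsome : ls[lo.toNat]? = some ls[lo.toNat] := List.getElem?_eq_getElem hlt
      have htake : (hi - lo).toNat = 1 := by omega
      have hseg : (ls.drop lo.toNat).take (hi - lo).toNat = [ls[lo.toNat]] := by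
        rw [htake, List.drop_eq_getElem_cons hlt]; rfl
      rw [hget, hsome, hseg]
      by_cases hv : ls[lo.toNat] = 1 <;> simp [hv] <;> omega
    · rw [dif_neg h1]
      have hmid : PySem.Int.floordiv (lo + hi) 2 = (lo + hi) / 2 :=
        PySem.Int.floordiv_eq_ediv_of_pos (by omega)
      simp only [hmid]
      have hb1 : lo < (lo + hi) / 2 := by omega
      have hb2 : (lo + hi) / 2 < hi := by omega
      rw [ih ((lo + hi) / 2 - lo).toNat (by omega) lo ((lo + hi) / 2) rfl h0 hb1 (by omega),
          ih (hi - (lo + hi) / 2).toNat (by omega) ((lo + hi) / 2) hi rfl (by omega) hb2 hh]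
      have hsplit : (ls.drop lo.toNat).take (hi - lo).toNat
          = (ls.drop lo.toNat).take ((lo + hi) / 2 - lo).toNat
            ++ (ls.drop ((lo + hi) / 2).toNat).take (hi - (lo + hi) / 2).toNat := by
        have hadd : (hi - lo).toNat = ((lo + hi) / 2 - lo).toNat + (hi - (lo + hi) / 2).toNat := by
          omega
        have hdr : lo.toNat + ((lo + hi) / 2 - lo).toNat = ((lo + hi) / 2).toNat := by omega
        rw [hadd, List.take_add, List.drop_drop, hdr]
      rw [hsplit, List.countP_append]
      push_cast
      ring

-- ===== VERDICT (by name: the statement is the Claim_ definition above) =====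
theorem check_tag_spec : Claim_equal_check_tag := by
  intro labels _
  unfold Spec_check_tag check_tag check_tag_alt
  by_cases h : labels.length = 0
  · simp [h]
  · have hm := pvMargin_eq labels ((labels.length : Int) - 0).toNat 0 (labels.length : Int) rfl (by omega) (by omega) (by omega)
    simp only [List.drop_zero, Int.toNat_zero, Int.sub_zero, Int.toNat_natCast,
      List.take_length] at hm
    rw [check_tag_fold]
    simp only [h, if_false, hm]
    by_cases hgt : (0 : Int) + (labels.countP (fun x => decide (x = 1)) : Int)
        > 0 + ((labels.length : Int) - (labels.countP (fun x => decide (x = 1)) : Int)) <;>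
      · simp only [gt_iff_lt] at *
        split_ifs with h2 <;> simp_all <;> omega
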